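-- pv_equiv track=rewrite | github.com/simonboegh/financeapp | modules/data.py | news_flags_from_titles
-- ===== SOURCE A (Python) =====
-- def news_flags_from_titles(news_list):
--     flags = {'earnings': False, 'upgrade': False, 'downgrade': False, 'mna': False}
--     for n in news_list or []:
--         title = (n.get('title') or '').lower()
--         if any(k in title for k in ['earnings', 'guidance', 'q1', 'q2', 'q3', 'q4']):
--             flags['earnings'] = True
--         if 'downgrade' in title or 'downgraded' in title:
--             flags['downgrade'] = True
--         if 'upgrade' in title or 'upgraded' in title:
--             flags['upgrade'] = True
--         if 'acquire' in title or 'acquisition' in title or 'merger' in title: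
--             flags['mna'] = True
--     return flags
-- ===== SOURCE B (Python) =====
-- def news_flags_from_titles(news_list):
--     titles = [(n.get('title') or '').lower() for n in (news_list or [])]
--     keywords = {
--         'earnings': ['earnings', 'guidance', 'q1', 'q2', 'q3', 'q4'],
--         'upgrade': ['upgrade', 'upgraded'],
--         'downgrade': ['downgrade', 'downgraded'],
--         'mna': ['acquire', 'acquisition', 'merger'],
--     }
--     return {flag: any(k in t for t in titles for k in kws)
--             for flag, kws in keywords.items()}
-- ===== Notes on version B (the rewrite author's own statement) =====
-- stated objective: idiomatic
-- what changed: Replaces the per-item loop with four hardcoded if/assign blocks by a keyword table: titles are lowered once, then each flag is computed as one any() over all titles (per-flag traversal instead of per-item flag mutation).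
import Mathlib
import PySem

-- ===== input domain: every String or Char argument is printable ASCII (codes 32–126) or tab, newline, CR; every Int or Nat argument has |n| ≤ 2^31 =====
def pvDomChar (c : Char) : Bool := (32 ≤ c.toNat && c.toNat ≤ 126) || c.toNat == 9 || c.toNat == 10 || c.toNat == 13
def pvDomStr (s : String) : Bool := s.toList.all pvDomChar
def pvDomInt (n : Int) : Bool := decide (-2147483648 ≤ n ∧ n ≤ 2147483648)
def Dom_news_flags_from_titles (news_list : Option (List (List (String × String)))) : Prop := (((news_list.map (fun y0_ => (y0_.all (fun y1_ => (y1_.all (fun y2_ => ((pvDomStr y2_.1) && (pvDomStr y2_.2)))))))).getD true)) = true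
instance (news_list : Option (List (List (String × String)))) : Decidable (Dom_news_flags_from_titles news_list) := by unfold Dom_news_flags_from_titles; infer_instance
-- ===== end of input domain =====

-- B computes each flag with one any() over the lowered titles, driven by a keyword table,
-- instead of A's per-item loop mutating four flags via hardcoded if-blocks (idiomatic rewrite).

-- ===== PORT A =====
-- (n.get('title') or '').lower(); 'or' maps none and "" both to "", which getD "" matches exactly
def pvTitleA (n : List (String × String)) : String :=
  PySem.Str.lower (((PySem.Dict.mk n).get? "title").getD "")

-- the four if-conditions of A's loop body, named so the proofs can speak about them
def pE (n : List (String × String)) : Bool :=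
  ["earnings", "guidance", "q1", "q2", "q3", "q4"].any (fun k => PySem.Str.isIn k (pvTitleA n))
def pD (n : List (String × String)) : Bool :=
  PySem.Str.isIn "downgrade" (pvTitleA n) || PySem.Str.isIn "downgraded" (pvTitleA n)
def pU (n : List (String × String)) : Bool :=
  PySem.Str.isIn "upgrade" (pvTitleA n) || PySem.Str.isIn "upgraded" (pvTitleA n)
def pM (n : List (String × String)) : Bool :=
  PySem.Str.isIn "acquire" (pvTitleA n) || PySem.Str.isIn "acquisition" (pvTitleA n)
    || PySem.Str.isIn "merger" (pvTitleA n)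

def pvStepA (flags : PySem.Dict String Bool) (n : List (String × String)) : PySem.Dict String Bool :=
  let flags := if pE n then flags.insert "earnings" true else flags
  let flags := if pD n then flags.insert "downgrade" true else flags
  let flags := if pU n then flags.insert "upgrade" true else flags
  let flags := if pM n then flags.insert "mna" true else flags
  flags

def news_flags_from_titles (news_list : Option (List (List (String × String)))) : List (String × Bool) :=
  let flags : PySem.Dict String Bool :=
    PySem.Dict.ofList [("earnings", false), ("upgrade", false), ("downgrade", false), ("mna", false)]
  ((news_list.getD []).foldl pvStepA flags).items

-- ===== PORT B =====
-- B's title extraction is the same one-line expression as A's; pvTitleA is reused for it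
def pvKeywords : List (String × List String) :=
  [("earnings", ["earnings", "guidance", "q1", "q2", "q3", "q4"]),
   ("upgrade", ["upgrade", "upgraded"]),
   ("downgrade", ["downgrade", "downgraded"]),
   ("mna", ["acquire", "acquisition", "merger"])]

def news_flags_from_titles_alt (news_list : Option (List (List (String × String)))) : List (String × Bool) :=
  let titles := (news_list.getD []).map pvTitleA
  pvKeywords.map (fun fk => (fk.1, titles.any (fun t => fk.2.any (fun k => PySem.Str.isIn k t))))

-- ===== PRECONDITION & SPEC =====
def Spec_news_flags_from_titles (news_list : Option (List (List (String × String)))) (out : List (String × Bool)) : Prop := out = news_flags_from_titles_alt news_list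
instance (news_list : Option (List (List (String × String)))) (out : List (String × Bool)) : Decidable (Spec_news_flags_from_titles news_list out) := by unfold Spec_news_flags_from_titles; infer_instance

-- ===== CLAIM (what is proved, stated in full; the proofs are below) =====
def Claim_equal_news_flags_from_titles : Prop := ∀ (news_list : Option (List (List (String × String)))), Dom_news_flags_from_titles news_list → Spec_news_flags_from_titles news_list (news_flags_from_titles news_list)

-- ===== LEMMAS AND PROOFS =====

set_option maxHeartbeats 1000000 in
lemma insE (e u d m : Bool) :
    (PySem.Dict.mk [("earnings", e), ("upgrade", u), ("downgrade", d), ("mna", m)]).insert "earnings" true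
    = PySem.Dict.mk [("earnings", true), ("upgrade", u), ("downgrade", d), ("mna", m)] := by
  simp [PySem.Dict.insert, PySem.Dict.contains]

set_option maxHeartbeats 1000000 in
lemma insU (e u d m : Bool) :
    (PySem.Dict.mk [("earnings", e), ("upgrade", u), ("downgrade", d), ("mna", m)]).insert "upgrade" true
    = PySem.Dict.mk [("earnings", e), ("upgrade", true), ("downgrade", d), ("mna", m)] := by
  simp [PySem.Dict.insert, PySem.Dict.contains]

set_option maxHeartbeats 1000000 in
lemma insD (e u d m : Bool) :
    (PySem.Dict.mk [("earnings", e), ("upgrade", u), ("downgrade", d), ("mna", m)]).insert "downgrade" true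
    = PySem.Dict.mk [("earnings", e), ("upgrade", u), ("downgrade", true), ("mna", m)] := by
  simp [PySem.Dict.insert, PySem.Dict.contains]

set_option maxHeartbeats 1000000 in
lemma insM (e u d m : Bool) :
    (PySem.Dict.mk [("earnings", e), ("upgrade", u), ("downgrade", d), ("mna", m)]).insert "mna" true
    = PySem.Dict.mk [("earnings", e), ("upgrade", u), ("downgrade", d), ("mna", true)] := by
  simp [PySem.Dict.insert, PySem.Dict.contains]

lemma stepA_eq (n : List (String × String)) (e u d m : Bool) :
    pvStepA (PySem.Dict.mk [("earnings", e), ("upgrade", u), ("downgrade", d), ("mna", m)]) n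
    = PySem.Dict.mk [("earnings", e || pE n), ("upgrade", u || pU n),
        ("downgrade", d || pD n), ("mna", m || pM n)] := by
  unfold pvStepA
  cases hE : pE n <;> cases hD : pD n <;> cases hU : pU n <;> cases hM : pM n <;>
    simp [insE, insU, insD, insM]

lemma foldA_eq (l : List (List (String × String))) (e u d m : Bool) :
    (l.foldl pvStepA (PySem.Dict.mk [("earnings", e), ("upgrade", u), ("downgrade", d), ("mna", m)])).items
    = [("earnings", e || l.any pE), ("upgrade", u || l.any pU),
       ("downgrade", d || l.any pD), ("mna", m || l.any pM)] := by
  induction l generalizing e u d m with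
  | nil => simp
  | cons n t ih =>
      rw [List.foldl_cons, stepA_eq n e u d m, ih]
      simp [Bool.or_assoc]

set_option maxHeartbeats 1000000 in
lemma ofList_init :
    (PySem.Dict.ofList [("earnings", false), ("upgrade", false), ("downgrade", false), ("mna", (false : Bool))])
    = PySem.Dict.mk [("earnings", false), ("upgrade", false), ("downgrade", false), ("mna", false)] := by
  simp [PySem.Dict.ofList, PySem.Dict.update, PySem.Dict.insert, PySem.Dict.contains, PySem.Dict.empty]

-- ===== VERDICT (by name: the statement is the Claim_ definition above) =====
set_option maxHeartbeats 1000000 in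
theorem news_flags_from_titles_spec : Claim_equal_news_flags_from_titles := by
  intro nl _
  show news_flags_from_titles nl = news_flags_from_titles_alt nl
  simp only [news_flags_from_titles, news_flags_from_titles_alt, ofList_init, foldA_eq,
    Bool.false_or]
  simp only [pvKeywords, List.map_cons, List.map_nil, List.any_map, List.cons.injEq,
    Prod.mk.injEq, List.any_cons, List.any_nil, Bool.or_false, and_true, true_and]
  refine ⟨?_, ?_, ?_, ?_⟩ <;>
    exact congrArg _ (funext fun n => by
      simp [pE, pU, pD, pM, Function.comp, pvTitleA, pvTitleA, Bool.or_assoc])
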